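-- pv_equiv track=rewrite | github.com/TechnicolorGUO/SciSage | core/utils.py | sanitize_graphviz_text
-- ===== SOURCE A (Python) =====
-- def sanitize_graphviz_text(text):
--     """Sanitize text for Graphviz DOT format with line wrapping at 30 characters."""
--     if not text:
--         return ""
--
--     # Escape quotes and backslashes
--     text = text.replace('\\', '\\\\').replace('"', '\\"')
--     text = text.replace('\n', ' ').replace('\r', '')
--
--     # Split into words and wrap at 30 characters per line
--     words = text.split()
--     lines = []
--     current_line = ""
--
--     for word in words:
--         # If adding this word would exceed 30 characters, start a new line
--         if current_line and len(current_line + " " + word) > 30: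
--             lines.append(current_line)
--             current_line = word
--         elif current_line:
--             current_line += " " + word
--         else:
--             current_line = word
--
--     # Add the last line if it exists
--     if current_line:
--         lines.append(current_line)
--
--     # Join lines with Graphviz line break syntax
--     return "\\n".join(lines)
-- ===== SOURCE B (Python) =====
-- def sanitize_graphviz_text(text):
--     """Sanitize text for Graphviz DOT format with line wrapping at 30 characters."""
--     if not text:
--         return ""
--
--     # Escape quotes and backslashes, flatten newlines
--     text = text.replace('\\', '\\\\').replace('"', '\\"')
--     text = text.replace('\n', ' ').replace('\r', '')
--
--     # Greedily chunk the word list: each line takes the longest prefix of the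
--     # remaining words that fits in 30 characters (the first word always goes in).
--     words = text.split()
--     lines = []
--     while words:
--         length = len(words[0])
--         k = 1
--         while k < len(words) and length + 1 + len(words[k]) <= 30:
--             length += 1 + len(words[k])
--             k += 1
--         lines.append(" ".join(words[:k]))
--         words = words[k:]
--
--     return "\\n".join(lines)
-- ===== Notes on version B (the rewrite author's own statement) =====
-- stated objective: alternative
-- what changed: Replaced the single fold that mutates a current_line string accumulator by greedy chunking of the word list: an inner scan grabs the maximal run of words fitting in 30 characters, the outer loop joins each run into a line.
import Mathlib
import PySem

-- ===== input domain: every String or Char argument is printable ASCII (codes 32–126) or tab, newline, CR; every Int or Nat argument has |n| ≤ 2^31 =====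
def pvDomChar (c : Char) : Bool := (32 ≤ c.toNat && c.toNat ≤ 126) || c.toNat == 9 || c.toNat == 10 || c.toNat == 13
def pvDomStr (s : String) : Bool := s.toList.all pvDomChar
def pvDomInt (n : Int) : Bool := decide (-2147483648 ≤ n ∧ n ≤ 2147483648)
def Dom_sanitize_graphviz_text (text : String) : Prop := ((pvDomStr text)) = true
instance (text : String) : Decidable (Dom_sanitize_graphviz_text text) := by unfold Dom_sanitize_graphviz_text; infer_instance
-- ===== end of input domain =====

-- B replaces A's fold over a mutable current_line accumulator by greedy chunking of the
-- word list (inner scan grabs a maximal fitting run, outer loop joins each run): alternative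
-- decomposition, same cost.

-- ===== PORT A =====
-- the body of A's for-loop (current_line bookkeeping), as a fold step
def pvStepA (st : List String × String) (word : String) : List String × String :=
  if st.2 ≠ "" ∧ PySem.Str.len (st.2 ++ " " ++ word) > 30 then (st.1 ++ [st.2], word)
  else if st.2 ≠ "" then (st.1, st.2 ++ " " ++ word)
  else (st.1, word)

def sanitize_graphviz_text (text : String) : String :=
  if text = "" then ""
  else
    let t1 := PySem.Str.replace (PySem.Str.replace text "\\" "\\\\") "\"" "\\\""
    let t2 := PySem.Str.replace (PySem.Str.replace t1 "\n" " ") "\r" ""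
    let words := PySem.Str.split₀ t2
    let st := words.foldl pvStepA ([], "")
    let lines := if st.2 ≠ "" then st.1 ++ [st.2] else st.1
    PySem.Str.join "\\n" lines

-- ===== PORT B =====
-- inner while loop of Source B: grab the maximal prefix of ws that still fits after `length`
def pvGrab (length : Int) (ws : List String) : List String × List String :=
  match ws with
  | [] => ([], [])
  | w :: rest =>
    if length + 1 + PySem.Str.len w ≤ 30 then
      let p := pvGrab (length + 1 + PySem.Str.len w) rest
      (w :: p.1, p.2)
    else ([], w :: rest)

theorem pvGrab_snd_length (length : Int) (ws : List String) :
    (pvGrab length ws).2.length ≤ ws.length := by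
  induction ws generalizing length with
  | nil => simp [pvGrab]
  | cons w rest ih =>
    simp only [pvGrab]
    split
    · exact le_trans (ih _) (Nat.le_succ _)
    · simp

-- outer while loop of Source B: one line per grabbed chunk
def pvWrap (ws : List String) : List String :=
  match ws with
  | [] => []
  | w :: rest =>
    PySem.Str.join " " (w :: (pvGrab (PySem.Str.len w) rest).1)
      :: pvWrap (pvGrab (PySem.Str.len w) rest).2
  termination_by ws.length
  decreasing_by
    simpa using Nat.lt_succ_of_le (pvGrab_snd_length (PySem.Str.len w) rest)

def sanitize_graphviz_text_alt (text : String) : String :=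
  if text = "" then ""
  else
    let t1 := PySem.Str.replace (PySem.Str.replace text "\\" "\\\\") "\"" "\\\""
    let t2 := PySem.Str.replace (PySem.Str.replace t1 "\n" " ") "\r" ""
    PySem.Str.join "\\n" (pvWrap (PySem.Str.split₀ t2))

-- ===== PRECONDITION & SPEC =====
def Spec_sanitize_graphviz_text (text : String) (out : String) : Prop := out = sanitize_graphviz_text_alt text
instance (text : String) (out : String) : Decidable (Spec_sanitize_graphviz_text text out) := by unfold Spec_sanitize_graphviz_text; infer_instance

-- ===== CLAIM (what is proved, stated in full; the proofs are below) =====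
def Claim_equal_sanitize_graphviz_text : Prop := ∀ (text : String), Dom_sanitize_graphviz_text text → Spec_sanitize_graphviz_text text (sanitize_graphviz_text text)

-- ===== LEMMAS AND PROOFS =====

-- length of "a ++ ' ' ++ b"
theorem pvLenApp (a b : String) :
    PySem.Str.len (a ++ " " ++ b) = PySem.Str.len a + 1 + PySem.Str.len b := by
  simp [PySem.Str.len_eq]
  ring

theorem pvAppNe (a b : String) : a ++ " " ++ b ≠ "" := by
  intro h
  have := congrArg String.toList h
  simp at this

theorem pvStrEq_of_toList {s t : String} (h : s.toList = t.toList) : s = t := by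
  have := congrArg String.ofList h
  simpa using this

-- joining with " " absorbs a pre-joined head
theorem pvJoinCons (a b : String) (t : List String) :
    PySem.Str.join " " ((a ++ " " ++ b) :: t) = PySem.Str.join " " (a :: b :: t) := by
  apply pvStrEq_of_toList
  cases t with
  | nil =>
    simp [PySem.Str.toList_join, PySem.Chars.join_singleton, PySem.Chars.join_cons_cons]
  | cons q tq =>
    simp [PySem.Str.toList_join, PySem.Chars.join_cons_cons]

-- words produced by str.split() are nonempty
theorem pvGo_ne_nil (s : List Char) : ∀ (cur : List Char) (acc : List (List Char)),
    (∀ w ∈ acc, w ≠ []) → ∀ w ∈ PySem.Chars.split₀.go s cur acc, w ≠ [] := by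
  induction s with
  | nil =>
    intro cur acc hacc w hw
    by_cases hc : cur.isEmpty
    · simp [PySem.Chars.split₀.go, hc] at hw
      exact hacc w hw
    · simp [PySem.Chars.split₀.go, hc] at hw
      rcases hw with hw | hw
      · exact hacc w hw
      · subst hw
        simpa [List.isEmpty_iff] using hc
  | cons c rest ih =>
    intro cur acc hacc w hw
    by_cases hs : PySem.Chars.isspace c
    · by_cases hc : cur.isEmpty
      · simp only [PySem.Chars.split₀.go, hs, hc, if_true] at hw
        exact ih [] acc hacc w hw
      · simp only [PySem.Chars.split₀.go, hs, hc, if_true] at hw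
        refine ih [] (cur.reverse :: acc) ?_ w hw
        intro v hv
        rcases List.mem_cons.mp hv with hv | hv
        · subst hv
          simpa [List.isEmpty_iff] using hc
        · exact hacc v hv
    · simp only [PySem.Chars.split₀.go, hs] at hw
      exact ih (c :: cur) acc hacc w hw

theorem pvSplit₀_ne_empty (s : String) : ∀ w ∈ PySem.Str.split₀ s, w ≠ "" := by
  intro w hw h
  subst h
  have hm : ("" : String).toList ∈ List.map String.toList (PySem.Str.split₀ s) :=
    List.mem_map_of_mem hw
  rw [PySem.Str.split₀_map_toList] at hm
  exact pvGo_ne_nil s.toList [] [] (by simp) _ hm rfl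

-- A's loop written as direct recursion on the remaining words (cur always nonempty)
def pvFA (cur : String) : List String → List String
  | [] => [cur]
  | w :: rest =>
    if PySem.Str.len (cur ++ " " ++ w) > 30 then cur :: pvFA w rest
    else pvFA (cur ++ " " ++ w) rest

theorem pvA1 (ws : List String) : ∀ (lines : List String) (cur : String), cur ≠ "" →
    (∀ x ∈ ws, x ≠ "") →
    (if (ws.foldl pvStepA (lines, cur)).2 ≠ "" then
        (ws.foldl pvStepA (lines, cur)).1 ++ [(ws.foldl pvStepA (lines, cur)).2]
      else (ws.foldl pvStepA (lines, cur)).1) = lines ++ pvFA cur ws := by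
  induction ws with
  | nil =>
    intro lines cur h _
    simp [pvFA, h]
  | cons w rest ih =>
    intro lines cur h hws
    have hw : w ≠ "" := hws w (by simp)
    have hrest : ∀ x ∈ rest, x ≠ "" := fun x hx => hws x (by simp [hx])
    simp only [List.foldl_cons, pvFA]
    by_cases hc : PySem.Str.len (cur ++ " " ++ w) > 30
    · rw [show pvStepA (lines, cur) w = (lines ++ [cur], w) from by
        unfold pvStepA; rw [if_pos ⟨h, hc⟩]]
      rw [ih (lines ++ [cur]) w hw hrest, if_pos hc]
      simp
    · rw [show pvStepA (lines, cur) w = (lines, cur ++ " " ++ w) from by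
        unfold pvStepA
        rw [if_neg (fun hh => hc hh.2), if_pos h]]
      rw [ih lines (cur ++ " " ++ w) (pvAppNe cur w) hrest, if_neg hc]

theorem pvJoinSingleton (cur : String) : PySem.Str.join " " [cur] = cur := by
  apply pvStrEq_of_toList
  simp [PySem.Str.toList_join, PySem.Chars.join_singleton]

theorem pvB1 (ws : List String) : ∀ (cur : String),
    pvFA cur ws = PySem.Str.join " " (cur :: (pvGrab (PySem.Str.len cur) ws).1)
      :: pvWrap (pvGrab (PySem.Str.len cur) ws).2 := by
  induction ws with
  | nil =>
    intro cur
    simp [pvFA, pvGrab, pvWrap, pvJoinSingleton]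
  | cons w rest ih =>
    intro cur
    by_cases hc : PySem.Str.len cur + 1 + PySem.Str.len w ≤ 30
    · have hgt : ¬ PySem.Str.len (cur ++ " " ++ w) > 30 := by rw [pvLenApp]; omega
      simp only [pvFA]
      rw [if_neg hgt, ih (cur ++ " " ++ w), pvLenApp, pvJoinCons]
      simp only [pvGrab]
      rw [if_pos hc]
    · have hgt : PySem.Str.len (cur ++ " " ++ w) > 30 := by rw [pvLenApp]; omega
      simp only [pvFA]
      rw [if_pos hgt, ih w]
      simp only [pvGrab]
      rw [if_neg hc, pvJoinSingleton]
      rw [show pvWrap (w :: rest) = PySem.Str.join " " (w :: (pvGrab (PySem.Str.len w) rest).1)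
            :: pvWrap (pvGrab (PySem.Str.len w) rest).2 from by rw [pvWrap]]

theorem pvMain (T : String) :
    (if ((PySem.Str.split₀ T).foldl pvStepA ([], "")).2 ≠ "" then
        ((PySem.Str.split₀ T).foldl pvStepA ([], "")).1
          ++ [((PySem.Str.split₀ T).foldl pvStepA ([], "")).2]
      else ((PySem.Str.split₀ T).foldl pvStepA ([], "")).1)
      = pvWrap (PySem.Str.split₀ T) := by
  have hne := pvSplit₀_ne_empty T
  revert hne
  generalize PySem.Str.split₀ T = ws
  intro hne
  cases ws with
  | nil => simp [pvWrap]
  | cons w0 rest =>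
    have h0 : w0 ≠ "" := hne w0 (by simp)
    have hrest : ∀ x ∈ rest, x ≠ "" := fun x hx => hne x (by simp [hx])
    have hstep : pvStepA ([], "") w0 = ([], w0) := by
      unfold pvStepA
      simp
    rw [List.foldl_cons, hstep, pvA1 rest [] w0 h0 hrest, pvB1 rest w0]
    rw [show pvWrap (w0 :: rest) = PySem.Str.join " " (w0 :: (pvGrab (PySem.Str.len w0) rest).1)
          :: pvWrap (pvGrab (PySem.Str.len w0) rest).2 from by rw [pvWrap]]
    simp

-- ===== VERDICT (by name: the statement is the Claim_ definition above) =====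
theorem sanitize_graphviz_text_spec : Claim_equal_sanitize_graphviz_text := by
  intro text _
  unfold Spec_sanitize_graphviz_text sanitize_graphviz_text sanitize_graphviz_text_alt
  by_cases ht : text = ""
  · simp [ht]
  · simp only [ht, if_false]
    show PySem.Str.join "\\n" _ = PySem.Str.join "\\n" _
    rw [pvMain]
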